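-- pv_equiv track=rewrite | github.com/yazeedhasan97/NameScreenerDemo | utilities/utils.py | sort_dict_keys_with_symbols
-- ===== SOURCE A (Python) =====
-- def sort_dict_keys_with_symbols(data: dict):
--     # Extract and group keys based on the same grouping logic
--     keys = list(data.keys())
--     groups = []
--     i = 0
--     while i < len(keys):
--         if keys[i].startswith('#') or keys[i].startswith('@'):
--             if i + 1 < len(keys) and not keys[i + 1].startswith(('#', '@')):
--                 groups.append([keys[i], keys[i + 1]])
--                 i += 2
--             else:
--                 groups.append([keys[i]])
--                 i += 1
--         else:
--             groups.append([keys[i]])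
--             i += 1
--
--     # Sort groups with keys starting with `#` or `@`
--     sorted_groups = sorted(
--         [g for g in groups if g[0].startswith(('#', '@'))],
--         key=lambda x: x[0]
--     ) + [g for g in groups if not g[0].startswith(('#', '@'))]
--
--     # Flatten the sorted groups back into a list
--     sorted_keys = [item for group in sorted_groups for item in group]
--
--     # Recreate the dictionary with sorted keys
--     sorted_dict = {key: data[key] for key in sorted_keys}
--     return sorted_dict
-- ===== SOURCE B (Python) =====
-- def sort_dict_keys_with_symbols(data: dict):
--     # No grouping pass and no sequential state: each index gets a LOCAL rank
--     # computed only from its own key and the immediately preceding key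
--     # (a non-symbol key is absorbed iff its predecessor is a symbol key,
--     # because symbol keys are never themselves absorbed), and ONE global
--     # sort of all indices by that rank rebuilds the dict. Symbol-group
--     # ranks start with '#' or '@', so the constant '~' (> both) ranks
--     # every ungrouped key after all groups, in original index order.
--     keys = list(data.keys())
--
--     def rank(i):
--         k = keys[i]
--         if k.startswith(('#', '@')):
--             return (k, 0)
--         if i > 0 and keys[i - 1].startswith(('#', '@')):
--             return (keys[i - 1], 1)
--         return ('~', i)
--
--     return {keys[i]: data[keys[i]] for i in sorted(range(len(keys)), key=rank)}
-- ===== Notes on version B (the rewrite author's own statement) =====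
-- stated objective: alternative
-- what changed: Replaces A's sequential group/partition/sort-groups/flatten pipeline by a stateless per-index ranking: each key's rank is computed locally from itself and the immediately preceding key (a non-symbol key is absorbed iff its predecessor is a symbol key, since symbol keys are never absorbed), and one global sort of all indices by rank (head_key, 0|1) / ('~', index) yields the final order directly.
import Mathlib
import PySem

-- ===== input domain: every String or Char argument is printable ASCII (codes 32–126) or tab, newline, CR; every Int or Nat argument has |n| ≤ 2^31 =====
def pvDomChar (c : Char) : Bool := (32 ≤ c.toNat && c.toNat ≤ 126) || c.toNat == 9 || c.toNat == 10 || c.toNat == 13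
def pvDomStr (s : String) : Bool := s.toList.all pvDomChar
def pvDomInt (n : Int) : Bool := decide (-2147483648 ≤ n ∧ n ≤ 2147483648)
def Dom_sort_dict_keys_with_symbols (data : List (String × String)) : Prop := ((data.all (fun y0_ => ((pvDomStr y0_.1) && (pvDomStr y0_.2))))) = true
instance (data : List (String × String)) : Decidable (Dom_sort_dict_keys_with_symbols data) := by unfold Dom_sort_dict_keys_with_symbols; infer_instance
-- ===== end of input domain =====

-- B replaces A's sequential group/partition/sort-groups/flatten pipeline by a stateless
-- per-index local rank ((head key, 0|1) for grouped keys, ('~', index) for the rest)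
-- and ONE global sort of all indices by that rank.

-- ===== PORT A =====

-- k.startswith('#') or k.startswith('@')  (the tuple form startswith(('#','@')) is the same test)
def pvSym (k : String) : Bool := PySem.Str.startswith k "#" || PySem.Str.startswith k "@"

-- A's while-loop over the index i, as structural recursion consuming one or two keys per step
def pvGroups : List String → List (List String)
  | [] => []
  | k :: rest =>
    if pvSym k then
      match rest with
      | k2 :: rest2 =>
        if !pvSym k2 then [k, k2] :: pvGroups rest2
        else [k] :: pvGroups (k2 :: rest2)
      | [] => [k] :: pvGroups []
    else [k] :: pvGroups rest

def sort_dict_keys_with_symbols (data : List (String × String)) : List (String × String) :=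
  let d := PySem.Dict.ofList data
  let keys := d.keys
  let groups := pvGroups keys
  -- g[0]: every group is nonempty, so headD "" is exact here
  let sortedGroups :=
    PySem.List.sorted (groups.filter (fun g => pvSym (g.headD ""))) (fun g => g.headD "") false
      ++ groups.filter (fun g => !pvSym (g.headD ""))
  let sortedKeys := sortedGroups.flatMap id
  -- data[key]: every key of sortedKeys is a key of d, so getD's default "" is never used (exact)
  (sortedKeys.foldl (fun acc k => acc.insert k (d.getD k "")) PySem.Dict.empty).items

-- ===== PORT B =====

-- B's rank(i): a Python 2-tuple key compares lexicographically, ported as a Lex pair (exact)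
def pvRank (keys : List String) (i : Int) : Lex (String × Int) :=
  -- keys[i] / keys[i-1]: rank is only applied to in-range i, so pyGetD's default "" is never used (exact)
  let k := PySem.List.pyGetD keys i ""
  if pvSym k then toLex (k, 0)
  else if decide (0 < i) && pvSym (PySem.List.pyGetD keys (i - 1) "") then
    toLex (PySem.List.pyGetD keys (i - 1) "", 1)
  else toLex ("~", i)

def sort_dict_keys_with_symbols_alt (data : List (String × String)) : List (String × String) :=
  let d := PySem.Dict.ofList data
  let keys := d.keys
  let order := PySem.List.sorted (PySem.List.pyRange 0 keys.length 1) (pvRank keys) false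
  -- keys[i]: every i of order is in range; data[key]: every such key is a key of d (defaults unused, exact)
  (order.foldl
    (fun acc i => acc.insert (PySem.List.pyGetD keys i "") (d.getD (PySem.List.pyGetD keys i "") ""))
    PySem.Dict.empty).items

-- ===== PRECONDITION & SPEC =====
def Spec_sort_dict_keys_with_symbols (data : List (String × String)) (out : List (String × String)) : Prop := out = sort_dict_keys_with_symbols_alt data
instance (data : List (String × String)) (out : List (String × String)) : Decidable (Spec_sort_dict_keys_with_symbols data out) := by unfold Spec_sort_dict_keys_with_symbols; infer_instance

-- ===== CLAIM (what is proved, stated in full; the proofs are below) =====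
def Claim_equal_sort_dict_keys_with_symbols : Prop := ∀ (data : List (String × String)), Dom_sort_dict_keys_with_symbols data → Spec_sort_dict_keys_with_symbols data (sort_dict_keys_with_symbols data)

-- ===== LEMMAS AND PROOFS =====

-- abbreviations for index-annotated groups (proof-side only)
def pvMsnd (g : List (Nat × String)) : List String := g.map Prod.snd
def pvIds (g : List (Nat × String)) : List Int := g.map (fun p => (p.1 : Int))
def pvHead (g : List (Nat × String)) : String := (g.headD (0, "")).2

-- index-annotated enumeration of the key list
def pvEnum : Nat → List String → List (Nat × String)
  | _, [] => []
  | s, k :: t => (s, k) :: pvEnum (s + 1) t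

-- A's grouping loop on index-annotated keys
def pvGroupsI : List (Nat × String) → List (List (Nat × String))
  | [] => []
  | p :: rest =>
    if pvSym p.2 then
      match rest with
      | q :: rest2 =>
        if !pvSym q.2 then [p, q] :: pvGroupsI rest2 else [p] :: pvGroupsI (q :: rest2)
      | [] => [p] :: pvGroupsI []
    else [p] :: pvGroupsI rest

theorem pvEnum_map_snd (l : List String) : ∀ s, (pvEnum s l).map Prod.snd = l := by
  induction l with
  | nil => intro s; simp [pvEnum]
  | cons a t ih => intro s; simp [pvEnum, ih]

theorem pvEnum_map_fst_int (l : List String) :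
    ∀ s : Nat, (pvEnum s l).map (fun p => (p.1 : Int)) = PySem.List.pyRange s (s + l.length) 1 := by
  induction l with
  | nil => intro s; simp [pvEnum, PySem.List.pyRange]
  | cons a t ih =>
    intro s
    have h1 : (s : Int) + ((a :: t).length : Int) = ((s + 1 : Nat) : Int) + (t.length : Int) := by
      push_cast [List.length_cons]; ring
    simp only [pvEnum, List.map_cons]
    rw [h1, PySem.List.pyRange_one_cons (by push_cast; omega), ih (s + 1)]
    push_cast; ring_nf

theorem pvEnum_pairwise (l : List String) :
    ∀ s : Nat, (pvEnum s l).Pairwise (fun p q => p.1 < q.1) := by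
  induction l with
  | nil => intro s; simp [pvEnum]
  | cons a t ih =>
    intro s
    refine List.Pairwise.cons ?_ (ih (s + 1))
    intro q hq
    have : ∀ s' : Nat, ∀ q ∈ pvEnum s' t, s' ≤ q.1 := by
      clear hq ih
      induction t with
      | nil => intro s' q hq; simp [pvEnum] at hq
      | cons b u ihu =>
        intro s' q hq
        rcases (by simpa [pvEnum] using hq : q = (s', b) ∨ q ∈ pvEnum (s' + 1) u) with rfl | hq
        · simp
        · have := ihu (s' + 1) q hq; omega
    have := this (s + 1) q hq; simp; omega

theorem pvGroupsI_map (E : List (Nat × String)) :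
    (pvGroupsI E).map pvMsnd = pvGroups (E.map Prod.snd) := by
  induction E using pvGroupsI.induct with
  | case1 => simp [pvGroupsI, pvGroups]
  | case2 p hs q rest2 hns ih =>
    rw [Bool.not_eq_true'] at hns
    rw [pvGroupsI.eq_def, pvGroups.eq_def]
    simp [hs, hns, ih, pvMsnd]
  | case3 p hs q rest2 hns ih =>
    rw [Bool.not_eq_true'] at hns; rw [Bool.not_eq_false] at hns
    rw [pvGroupsI.eq_def, pvGroups.eq_def]
    simp [hs, hns, ih, pvMsnd]
  | case4 p hs =>
    rw [pvGroupsI.eq_def, pvGroups.eq_def]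
    simp [hs, pvGroupsI, pvGroups, pvMsnd]
  | case5 p rest hs ih =>
    rw [Bool.not_eq_true] at hs
    rw [pvGroupsI.eq_def, pvGroups.eq_def]
    simp [hs, ih, pvMsnd]

theorem pvGroupsI_flatten (E : List (Nat × String)) : (pvGroupsI E).flatten = E := by
  induction E using pvGroupsI.induct with
  | case1 => simp [pvGroupsI]
  | case2 p hs q rest2 hns ih => rw [pvGroupsI.eq_def]; simp_all
  | case3 p hs q rest2 hns ih => rw [pvGroupsI.eq_def]; simp_all
  | case4 p hs => rw [pvGroupsI.eq_def]; simp_all [pvGroupsI]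
  | case5 p rest hs ih => rw [pvGroupsI.eq_def]; simp_all

theorem pvGroups_heads_sublist (ks : List String) :
    ((pvGroups ks).map (fun g => g.headD "")).Sublist ks := by
  induction ks using pvGroups.induct with
  | case1 => simp [pvGroups]
  | case2 k hs k2 rest2 hns ih =>
    rw [Bool.not_eq_true'] at hns
    rw [pvGroups.eq_def]; simp only [hs, hns, if_pos]
    simp only [Bool.not_false, if_true, List.map_cons, List.headD_cons]
    exact List.Sublist.cons₂ k (List.Sublist.cons k2 ih)
  | case3 k hs k2 rest2 hns ih =>
    rw [pvGroups.eq_def]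
    simp only [hs, if_pos, Bool.not_eq_eq_eq_not, Bool.not_true] at *
    simp only [hns]
    exact List.Sublist.cons₂ k ih
  | case4 k hs =>
    rw [pvGroups.eq_def]; simp [hs, pvGroups]
  | case5 k rest hs ih =>
    rw [Bool.not_eq_true] at hs
    rw [pvGroups.eq_def]; simp only [hs, Bool.false_eq_true, if_false]
    exact List.Sublist.cons₂ k ih

-- classification of every group of the top-level grouping, with its index facts
def pvCls (K : List String) (g : List (Nat × String)) : Prop :=
  (∃ i k, g = [(i, k)] ∧ i < K.length ∧ K.getD i "" = k ∧ pvSym k = true)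
  ∨ (∃ i k k2, g = [(i, k), (i + 1, k2)] ∧ i + 1 < K.length ∧ K.getD i "" = k ∧
      K.getD (i + 1) "" = k2 ∧ pvSym k = true ∧ pvSym k2 = false)
  ∨ (∃ i k, g = [(i, k)] ∧ i < K.length ∧ K.getD i "" = k ∧ pvSym k = false ∧
      (i = 0 ∨ pvSym (K.getD (i - 1) "") = false))

theorem pvMain (K : List String) : ∀ (m s : Nat), K.length - s ≤ m →
    (s = 0 ∨ pvSym (K.getD (s - 1) "") = false ∨ (s < K.length ∧ pvSym (K.getD s "") = true)) →
    ∀ g ∈ pvGroupsI (pvEnum s (K.drop s)), pvCls K g := by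
  intro m
  induction m with
  | zero =>
    intro s hle _ g hg
    rw [List.drop_eq_nil_of_le (by omega)] at hg
    simp [pvEnum, pvGroupsI] at hg
  | succ m ih =>
    intro s hle hp g hg
    by_cases hsK : s < K.length
    · have hgetS : K.getD s "" = K[s] := List.getD_eq_getElem K "" hsK
      have hdrop : K.drop s = K[s] :: K.drop (s + 1) := (List.getElem_cons_drop hsK).symm
      rw [hdrop] at hg
      simp only [pvEnum] at hg
      by_cases hk : pvSym K[s] = true
      · by_cases hs1 : s + 1 < K.length
        · have hget1 : K.getD (s + 1) "" = K[s + 1] := List.getD_eq_getElem K "" hs1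
          have hdrop1 : K.drop (s + 1) = K[s + 1] :: K.drop (s + 2) :=
            (List.getElem_cons_drop hs1).symm
          rw [hdrop1] at hg
          simp only [pvEnum] at hg
          rw [pvGroupsI.eq_def] at hg
          by_cases hk2 : pvSym K[s + 1] = true
          · simp only [hk, hk2, Bool.not_true, Bool.false_eq_true, if_true, if_false,
              List.mem_cons] at hg
            rcases hg with rfl | hg
            · exact Or.inl ⟨s, K[s], rfl, hsK, hgetS, hk⟩
            · refine ih (s + 1) (by omega) (Or.inr (Or.inr ⟨hs1, by rw [hget1]; exact hk2⟩)) g ?_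
              rw [hdrop1]
              simpa [pvEnum] using hg
          · rw [Bool.not_eq_true] at hk2
            simp only [hk, hk2, Bool.not_false, if_true, List.mem_cons] at hg
            rcases hg with rfl | hg
            · exact Or.inr (Or.inl ⟨s, K[s], K[s + 1], rfl, hs1, hgetS, hget1, hk, hk2⟩)
            · refine ih (s + 2) (by omega) (Or.inr (Or.inl (by
                rw [show s + 2 - 1 = s + 1 from rfl, hget1]; exact hk2))) g hg
        · have hdrop1 : K.drop (s + 1) = [] := List.drop_eq_nil_of_le (by omega)
          rw [hdrop1] at hg
          simp only [pvEnum] at hg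
          rw [pvGroupsI.eq_def] at hg
          simp only [hk, if_true, List.mem_cons] at hg
          rcases hg with rfl | hg
          · exact Or.inl ⟨s, K[s], rfl, hsK, hgetS, hk⟩
          · simp [pvGroupsI] at hg
      · rw [Bool.not_eq_true] at hk
        rw [pvGroupsI.eq_def] at hg
        simp only [hk, Bool.false_eq_true, if_false, List.mem_cons] at hg
        rcases hg with rfl | hg
        · refine Or.inr (Or.inr ⟨s, K[s], rfl, hsK, hgetS, hk, ?_⟩)
          rcases hp with h0 | h | ⟨_, h⟩
          · exact Or.inl h0
          · exact Or.inr h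
          · rw [hgetS] at h; rw [h] at hk; exact absurd hk (by simp)
        · refine ih (s + 1) (by omega) (Or.inr (Or.inl (by
            rw [show s + 1 - 1 = s from rfl, hgetS]; exact hk))) g hg
    · rw [List.drop_eq_nil_of_le (by omega)] at hg
      simp [pvEnum, pvGroupsI] at hg

theorem pvClassify (K : List String) : ∀ g ∈ pvGroupsI (pvEnum 0 K), pvCls K g := by
  intro g hg
  exact pvMain K K.length 0 (by omega) (Or.inl rfl) g (by simpa using hg)

-- symbol keys start with '#' (35) or '@' (64), hence sort before "~" (126)
theorem pvSym_lt_tilde (h : String) (hs : pvSym h = true) : h < "~" := by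
  refine String.lt_iff_toList_lt.mpr ?_
  rcases Bool.or_eq_true_iff.mp (by simpa [pvSym] using hs) with hp | hp
  · obtain ⟨t, ht⟩ := (PySem.Chars.startswith_iff _ _).mp (by simpa using hp)
    rw [show "~".toList = ['~'] from rfl, ← ht]
    exact List.Lex.rel (by decide)
  · obtain ⟨t, ht⟩ := (PySem.Chars.startswith_iff _ _).mp (by simpa using hp)
    rw [show "~".toList = ['~'] from rfl, ← ht]
    exact List.Lex.rel (by decide)

-- rank evaluations
theorem pvRank_sym (K : List String) (i : Nat) (k : String) (_hi : i < K.length)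
    (hk : K.getD i "" = k) (hs : pvSym k = true) : pvRank K (i : Int) = toLex (k, 0) := by
  have hget : PySem.List.pyGetD K (i : Int) "" = k := by
    rw [PySem.List.pyGetD_natCast]; exact hk
  simp [pvRank, hget, hs]

theorem pvRank_fol (K : List String) (i : Nat) (k k2 : String) (_hi : i + 1 < K.length)
    (hk : K.getD i "" = k) (hk2 : K.getD (i + 1) "" = k2) (hs : pvSym k = true)
    (hns : pvSym k2 = false) : pvRank K ((i : Int) + 1) = toLex (k, 1) := by
  have hget2 : PySem.List.pyGetD K ((i : Int) + 1) "" = k2 := by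
    rw [show (i : Int) + 1 = ((i + 1 : Nat) : Int) by push_cast; ring,
      PySem.List.pyGetD_natCast]
    exact hk2
  have hget : PySem.List.pyGetD K ((i : Int) + 1 - 1) "" = k := by
    rw [show (i : Int) + 1 - 1 = (i : Int) by ring, PySem.List.pyGetD_natCast]; exact hk
  have hpos : (0 : Int) < (i : Int) + 1 := by omega
  have hk' : K[i]?.getD "" = k := by rw [← List.getD_eq_getElem?_getD]; exact hk
  simp [pvRank, hget2, hns, hs, hpos, hk']

theorem pvRank_plain (K : List String) (i : Nat) (k : String) (hi : i < K.length)
    (hk : K.getD i "" = k) (hns : pvSym k = false)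
    (hp : i = 0 ∨ pvSym (K.getD (i - 1) "") = false) :
    pvRank K (i : Int) = toLex ("~", (i : Int)) := by
  have hget : PySem.List.pyGetD K (i : Int) "" = k := by
    rw [PySem.List.pyGetD_natCast]; exact hk
  rcases Nat.eq_zero_or_pos i with rfl | hi0
  · have hget0 : PySem.List.pyGetD K (0 : Int) "" = k := by exact_mod_cast hget
    simp [pvRank, hget0, hns]
  · have hp' : pvSym (K.getD (i - 1) "") = false := by
      rcases hp with h0 | h
      · omega
      · exact h
    have hget1 : PySem.List.pyGetD K ((i : Int) - 1) "" = K.getD (i - 1) "" := by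
      rw [show (i : Int) - 1 = ((i - 1 : Nat) : Int) by push_cast [hi0]; ring,
        PySem.List.pyGetD_natCast]
    have hp'' : pvSym (K[i - 1]?.getD "") = false := by
      rw [← List.getD_eq_getElem?_getD]; exact hp'
    simp [pvRank, hget, hns, hget1, hp'']

-- the common reordered group list
def pvL (K : List String) : List (List (Nat × String)) :=
  PySem.List.sorted ((pvGroupsI (pvEnum 0 K)).filter (fun g => pvSym (pvHead g))) pvHead false
    ++ (pvGroupsI (pvEnum 0 K)).filter (fun g => !pvSym (pvHead g))

-- heads agree with the unannotated heads
theorem pvHead_eq (g : List (Nat × String)) : pvHead g = (pvMsnd g).headD "" := by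
  cases g <;> simp [pvHead, pvMsnd]

-- every group of pvL is a group of the top-level grouping
theorem pvL_mem (K : List String) : ∀ g ∈ pvL K, g ∈ pvGroupsI (pvEnum 0 K) := by
  intro g hg
  rcases List.mem_append.mp hg with hg | hg
  · exact (List.mem_filter.mp ((PySem.List.mem_sorted _ _ _ _).mp hg)).1
  · exact (List.mem_filter.mp hg).1

-- heads of the symbol groups are distinct when the keys are
theorem pvHeads_nodup (K : List String) (hnd : K.Nodup) :
    (((pvGroupsI (pvEnum 0 K)).filter (fun g => pvSym (pvHead g))).map pvHead).Nodup := by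
  have hmap : (pvGroupsI (pvEnum 0 K)).map pvHead
      = ((pvGroups K).map (fun g => g.headD "")) := by
    have : (pvGroupsI (pvEnum 0 K)).map pvHead
        = ((pvGroupsI (pvEnum 0 K)).map pvMsnd).map (fun g => g.headD "") := by
      rw [List.map_map]
      exact List.map_congr_left (fun g _ => pvHead_eq g)
    rw [this, pvGroupsI_map, pvEnum_map_snd]
  have hsub : (((pvGroupsI (pvEnum 0 K)).filter (fun g => pvSym (pvHead g))).map pvHead).Sublist
      ((pvGroupsI (pvEnum 0 K)).map pvHead) := List.filter_sublist.map _
  rw [hmap] at hsub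
  exact (hsub.trans (pvGroups_heads_sublist K)).nodup hnd

-- every member of a symbol-headed group ranks as (head, c)
theorem pvMemberRank (K : List String) (g : List (Nat × String)) (hc : pvCls K g)
    (hs : pvSym (pvHead g) = true) :
    ∀ j ∈ pvIds g, ∃ c : Int, pvRank K j = toLex (pvHead g, c) := by
  rcases hc with ⟨i, k, rfl, hi, hk, hks⟩ |
    ⟨i, k, k2, rfl, hi, hk, hk2, hks, hkn⟩ | ⟨i, k, rfl, hi, hk, hkn, _⟩
  · intro j hj
    rcases (by simpa [pvIds] using hj : j = (i : Int)) with rfl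
    exact ⟨0, by simpa [pvHead] using pvRank_sym K i k hi hk hks⟩
  · intro j hj
    rcases (by simpa [pvIds] using hj : j = (i : Int) ∨ j = ((i + 1 : Nat) : Int)) with rfl | rfl
    · exact ⟨0, by simpa [pvHead] using pvRank_sym K i k (by omega) hk hks⟩
    · refine ⟨1, ?_⟩
      rw [show ((i + 1 : Nat) : Int) = (i : Int) + 1 by push_cast; ring]
      simpa [pvHead] using pvRank_fol K i k k2 hi hk hk2 hks hkn
  · rw [show pvHead [(i, k)] = k from rfl] at hs
    rw [hs] at hkn; exact absurd hkn (by simp)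

-- a plain-headed group is a lone non-symbol key ranking as ("~", index)
theorem pvPlainRank (K : List String) (g : List (Nat × String)) (hc : pvCls K g)
    (hs : pvSym (pvHead g) = false) :
    ∃ i k, g = [(i, k)] ∧ pvRank K (i : Int) = toLex ("~", (i : Int)) := by
  rcases hc with ⟨i, k, rfl, hi, hk, hks⟩ |
    ⟨i, k, k2, rfl, hi, hk, hk2, hks, hkn⟩ | ⟨i, k, rfl, hi, hk, hkn, hp⟩
  · rw [show pvHead [(i, k)] = k from rfl] at hs; rw [hs] at hks; exact absurd hks (by simp)
  · rw [show pvHead [(i, k), (i + 1, k2)] = k from rfl] at hs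
    rw [hs] at hks; exact absurd hks (by simp)
  · exact ⟨i, k, rfl, pvRank_plain K i k hi hk hkn hp⟩

-- inside one group, ranks strictly increase
theorem pvInnerPairwise (K : List String) (g : List (Nat × String)) (hc : pvCls K g) :
    (pvIds g).Pairwise (fun a b => pvRank K a < pvRank K b) := by
  rcases hc with ⟨i, k, rfl, hi, hk, hks⟩ |
    ⟨i, k, k2, rfl, hi, hk, hk2, hks, hkn⟩ | ⟨i, k, rfl, hi, hk, hkn, hp⟩
  · simp [pvIds]
  · have h0 := pvRank_sym K i k (by omega) hk hks
    have h1 := pvRank_fol K i k k2 hi hk hk2 hks hkn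
    simp only [pvIds, List.map_cons, List.map_nil, List.pairwise_cons]
    refine ⟨?_, by simp⟩
    intro b hb
    rcases (by simpa using hb : b = ((i + 1 : Nat) : Int)) with rfl
    rw [show ((i + 1 : Nat) : Int) = (i : Int) + 1 by push_cast; ring, h0, h1]
    simp [Prod.Lex.lt_iff]
  · simp [pvIds]

-- B's sort of all indices produces exactly the flattened indices of pvL
theorem pvOrderEq (K : List String) (hnd : K.Nodup) :
    PySem.List.sorted (PySem.List.pyRange 0 K.length 1) (pvRank K) false
      = (pvL K).flatMap pvIds := by
  have hGIperm : (pvL K).Perm (pvGroupsI (pvEnum 0 K)) :=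
    (List.Perm.append_right _ (PySem.List.sorted_perm _ _ _)).trans
      (List.filter_append_perm _ _)
  have hflat : (pvGroupsI (pvEnum 0 K)).flatMap pvIds
      = ((pvGroupsI (pvEnum 0 K)).flatten).map (fun p => ((p.1 : Nat) : Int)) := by
    simp only [List.flatMap_def, List.map_flatten]
    rfl
  have hrange : (pvGroupsI (pvEnum 0 K)).flatMap pvIds = PySem.List.pyRange 0 K.length 1 := by
    rw [hflat, pvGroupsI_flatten, pvEnum_map_fst_int K 0]
    norm_num
  have hidx : (pvGroupsI (pvEnum 0 K)).Pairwise
      (fun a b => ∀ x ∈ a, ∀ y ∈ b, x.1 < y.1) :=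
    (List.pairwise_flatten.mp (by rw [pvGroupsI_flatten]; exact pvEnum_pairwise K 0)).2
  apply PySem.List.sorted_eq_of_perm_of_pairwise_lt
  · rw [← hrange]
    exact List.Perm.flatMap_right pvIds hGIperm
  · rw [List.flatMap_def, List.pairwise_flatten]
    constructor
    · intro l hl
      obtain ⟨g, hgL, rfl⟩ := List.mem_map.mp hl
      exact pvInnerPairwise K g (pvClassify K g (pvL_mem K g hgL))
    · rw [List.pairwise_map, pvL, List.pairwise_append]
      set S := PySem.List.sorted
        ((pvGroupsI (pvEnum 0 K)).filter (fun g => pvSym (pvHead g))) pvHead false with hS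
      have hSmem : ∀ g ∈ S, g ∈ pvGroupsI (pvEnum 0 K) ∧ pvSym (pvHead g) = true := by
        intro g hg
        have := (PySem.List.mem_sorted _ _ _ _).mp hg
        exact ⟨(List.mem_filter.mp this).1, by simpa using (List.mem_filter.mp this).2⟩
      have hPmem : ∀ g ∈ (pvGroupsI (pvEnum 0 K)).filter (fun g => !pvSym (pvHead g)),
          g ∈ pvGroupsI (pvEnum 0 K) ∧ pvSym (pvHead g) = false := by
        intro g hg
        exact ⟨(List.mem_filter.mp hg).1, by simpa using (List.mem_filter.mp hg).2⟩
      have hle : S.Pairwise (fun a b => pvHead a ≤ pvHead b) :=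
        PySem.List.sorted_pairwise _ _
      have hmapnd : (S.map pvHead).Nodup :=
        (((PySem.List.sorted_perm _ _ _).map pvHead).nodup_iff).mpr (pvHeads_nodup K hnd)
      have hne : S.Pairwise (fun a b => pvHead a ≠ pvHead b) := List.pairwise_map.mp hmapnd
      have hlt : S.Pairwise (fun a b => pvHead a < pvHead b) :=
        (hle.and hne).imp (fun h => lt_of_le_of_ne h.1 h.2)
      refine ⟨?_, ?_, ?_⟩
      · refine hlt.imp_of_mem ?_
        intro g g' hg hg' hlt' x hx y hy
        obtain ⟨c, hc⟩ := pvMemberRank K g (pvClassify K g (hSmem g hg).1) (hSmem g hg).2 x hx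
        obtain ⟨c', hc'⟩ :=
          pvMemberRank K g' (pvClassify K g' (hSmem g' hg').1) (hSmem g' hg').2 y hy
        rw [hc, hc']
        simp [Prod.Lex.lt_iff, hlt']
      · have hpw : ((pvGroupsI (pvEnum 0 K)).filter (fun g => !pvSym (pvHead g))).Pairwise
            (fun a b => ∀ x ∈ a, ∀ y ∈ b, x.1 < y.1) := hidx.sublist List.filter_sublist
        refine hpw.imp_of_mem ?_
        intro g g' hg hg' hcr x hx y hy
        obtain ⟨i, k, rfl, hr⟩ :=
          pvPlainRank K g (pvClassify K g (hPmem g hg).1) (hPmem g hg).2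
        obtain ⟨i', k', rfl, hr'⟩ :=
          pvPlainRank K g' (pvClassify K g' (hPmem g' hg').1) (hPmem g' hg').2
        rcases (by simpa [pvIds] using hx : x = (i : Int)) with rfl
        rcases (by simpa [pvIds] using hy : y = (i' : Int)) with rfl
        rw [hr, hr']
        have : i < i' := hcr (i, k) (by simp) (i', k') (by simp)
        simp [Prod.Lex.lt_iff]
        omega
      · intro g hg g' hg' x hx y hy
        obtain ⟨c, hc⟩ := pvMemberRank K g (pvClassify K g (hSmem g hg).1) (hSmem g hg).2 x hx
        obtain ⟨i', k', rfl, hr'⟩ :=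
          pvPlainRank K g' (pvClassify K g' (hPmem g' hg').1) (hPmem g' hg').2
        rcases (by simpa [pvIds] using hy : y = (i' : Int)) with rfl
        rw [hc, hr']
        have := pvSym_lt_tilde (pvHead g) (hSmem g hg).2
        simp [Prod.Lex.lt_iff]
        exact Or.inl (String.lt_iff_toList_lt.mp this)

-- A's sorted key list is exactly the flattened keys of pvL
theorem pvKeysEq (K : List String) (hnd : K.Nodup) :
    (PySem.List.sorted ((pvGroups K).filter (fun g => pvSym (g.headD ""))) (fun g => g.headD "") false
        ++ (pvGroups K).filter (fun g => !pvSym (g.headD ""))).flatMap id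
      = (pvL K).flatMap pvMsnd := by
  have hK : pvGroups K = (pvGroupsI (pvEnum 0 K)).map pvMsnd := by
    rw [pvGroupsI_map, pvEnum_map_snd]
  have hfil1 : (pvGroups K).filter (fun g => pvSym (g.headD ""))
      = ((pvGroupsI (pvEnum 0 K)).filter (fun g => pvSym (pvHead g))).map pvMsnd := by
    rw [hK, List.filter_map]
    congr 1
    exact List.filter_congr (fun g _ => by simp [Function.comp, pvHead_eq])
  have hfil2 : (pvGroups K).filter (fun g => !pvSym (g.headD ""))
      = ((pvGroupsI (pvEnum 0 K)).filter (fun g => !pvSym (pvHead g))).map pvMsnd := by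
    rw [hK, List.filter_map]
    congr 1
    exact List.filter_congr (fun g _ => by simp [Function.comp, pvHead_eq])
  set S := PySem.List.sorted
    ((pvGroupsI (pvEnum 0 K)).filter (fun g => pvSym (pvHead g))) pvHead false with hS
  have hsort : PySem.List.sorted
      (((pvGroupsI (pvEnum 0 K)).filter (fun g => pvSym (pvHead g))).map pvMsnd)
      (fun g => g.headD "") false = S.map pvMsnd := by
    apply PySem.List.sorted_eq_of_perm_of_pairwise_lt
    · exact (PySem.List.sorted_perm _ _ _).map pvMsnd
    · rw [List.pairwise_map]
      have hle : S.Pairwise (fun a b => pvHead a ≤ pvHead b) :=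
        PySem.List.sorted_pairwise _ _
      have hmapnd : (S.map pvHead).Nodup :=
        (((PySem.List.sorted_perm _ _ _).map pvHead).nodup_iff).mpr (pvHeads_nodup K hnd)
      have hne : S.Pairwise (fun a b => pvHead a ≠ pvHead b) := List.pairwise_map.mp hmapnd
      have hlt : S.Pairwise (fun a b => pvHead a < pvHead b) :=
        (hle.and hne).imp (fun h => lt_of_le_of_ne h.1 h.2)
      exact hlt.imp (fun {a b} h => by rw [← pvHead_eq, ← pvHead_eq]; exact h)
  rw [hfil1, hfil2, hsort, pvL, List.flatMap_append, List.flatMap_append]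
  congr 1 <;> · simp only [List.flatMap_def, List.map_map]; rfl

-- fetching each index of pvL's flattened ids from K gives pvL's flattened keys
theorem pvIdsKeys (K : List String) :
    ((pvL K).flatMap pvIds).map (fun j => PySem.List.pyGetD K j "") = (pvL K).flatMap pvMsnd := by
  rw [List.map_flatMap]
  refine List.flatMap_congr (fun g hg => ?_)
  rcases pvClassify K g (pvL_mem K g hg) with ⟨i, k, rfl, hi, hk, _⟩ |
    ⟨i, k, k2, rfl, hi, hk, hk2, _, _⟩ | ⟨i, k, rfl, hi, hk, _, _⟩
  · simp [pvIds, pvMsnd, List.getD_eq_getElem?_getD.symm ▸ hk]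
  · have h2 : PySem.List.pyGetD K ((i : Int) + 1) "" = k2 := by
      rw [show (i : Int) + 1 = ((i + 1 : Nat) : Int) by push_cast; ring,
        PySem.List.pyGetD_natCast]
      exact hk2
    have hk' : K[i]?.getD "" = k := List.getD_eq_getElem?_getD ▸ hk
    simp [pvIds, pvMsnd, hk', h2]
  · simp [pvIds, pvMsnd, List.getD_eq_getElem?_getD.symm ▸ hk]

-- ===== VERDICT (by name: the statement is the Claim_ definition above) =====
theorem sort_dict_keys_with_symbols_spec : Claim_equal_sort_dict_keys_with_symbols := by
  intro data _
  unfold Spec_sort_dict_keys_with_symbols sort_dict_keys_with_symbols sort_dict_keys_with_symbols_alt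
  dsimp only
  have hnd : (PySem.Dict.ofList data).keys.Nodup := PySem.Dict.nodup_keys_ofList data
  rw [pvOrderEq _ hnd, pvKeysEq _ hnd, ← pvIdsKeys]
  rw [List.foldl_map]
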